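-- pv_equiv track=rewrite | github.com/Srg-Blmv/pt-NGFW-Rules-to-HTML | to_html_rules.py | extract_name_or_ip
-- ===== SOURCE A (Python) =====
-- color_ip = "#507EA4"          # Немного приглушенный синий
--
-- color_net_gr = "#EB7852"      # Теплый оранжевый
--
-- color_geo = "#7FB99D"         # Приятный зеленый
--
-- color_fqdn = "#DF8743"        # Более теплый оранжевый
--
-- color_net_range = "#ED7AA1"   # Мягкий розовый
--
-- def extract_name_or_ip(objects, color):
--     ip_list = []
--
--     if color:
--         for obj in objects:
--             if "networkIpAddress" in obj:
--                 ip_list.append(f'<span style="color: {color_ip}">{obj["networkIpAddress"].get("inet", "")}</span>')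
--             elif "networkGroup" in obj:
--                 ip_list.append(f'<span style="color: {color_net_gr}">{obj["networkGroup"].get("name", "")}</span>')
--             elif "networkGeoAddress" in obj:
--                 ip_list.append(f'<span style="color: {color_geo}">{obj["networkGeoAddress"].get("name", "")}</span>')
--             elif "networkFqdn" in obj:
--                 ip_list.append(f'<span style="color: {color_fqdn}">{obj["networkFqdn"].get("fqdn", "")}</span>')
--             elif "networkIpRange" in obj:
--                 ip_list.append(f'<span style="color: {color_net_range}">{obj["networkIpRange"].get("name", "")}</span>')
--             else:
--                 ip_list.append("Error")
--     else:
--         for obj in objects: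
--             if "networkIpAddress" in obj:
--                 ip_list.append(obj["networkIpAddress"].get("inet", ""))
--             elif "networkGroup" in obj:
--                 ip_list.append(obj["networkGroup"].get("name", ""))
--             elif "networkGeoAddress" in obj:
--                 ip_list.append(obj["networkGeoAddress"].get("name", ""))
--             elif "networkFqdn" in obj:
--                 ip_list.append(obj["networkFqdn"].get("fqdn", ""))
--             elif "ipV4Range" in obj:
--                 ip_list.append(obj["ipV4Range"].get("name", ""))
--             else:
--                 ip_list.append("Error")
--
--     return "<br> ".join(ip_list)
-- ===== SOURCE B (Python) =====
-- # Different algorithm: instead of probing a fixed priority chain of keys per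
-- # object, scan each object's own entries ONCE, keeping the entry with the
-- # lowest priority rank seen so far (rank looked up in a per-mode dict); then
-- # format the winner.  The fifth recognized key depends on the mode
-- # ("networkIpRange" when colored, "ipV4Range" when plain), as in the original.
-- _SUBS = ["inet", "name", "name", "fqdn", "name"]
-- _COLORS = ["#507EA4", "#EB7852", "#7FB99D", "#DF8743", "#ED7AA1"]
--
-- def extract_name_or_ip(objects, color):
--     ranks = {"networkIpAddress": 0, "networkGroup": 1,
--              "networkGeoAddress": 2, "networkFqdn": 3,
--              ("networkIpRange" if color else "ipV4Range"): 4}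
--     parts = []
--     for obj in objects:
--         best = None  # (rank, value_dict) with the smallest rank seen so far
--         for k, v in obj.items():
--             r = ranks.get(k)
--             if r is not None and (best is None or r < best[0]):
--                 best = (r, v)
--         if best is None:
--             parts.append("Error")
--         else:
--             r, v = best
--             val = v.get(_SUBS[r], "")
--             parts.append(f'<span style="color: {_COLORS[r]}">{val}</span>' if color else val)
--     return "<br> ".join(parts)
-- ===== Notes on version B (the rewrite author's own statement) =====
-- stated objective: alternative
-- what changed: Instead of probing a fixed chain of five keys per object (first-match over the key list), B scans each object's own entries once keeping the entry of minimal priority rank (rank dict built per mode, networkIpRange vs ipV4Range as fifth key) and formats the winner.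
import Mathlib
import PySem

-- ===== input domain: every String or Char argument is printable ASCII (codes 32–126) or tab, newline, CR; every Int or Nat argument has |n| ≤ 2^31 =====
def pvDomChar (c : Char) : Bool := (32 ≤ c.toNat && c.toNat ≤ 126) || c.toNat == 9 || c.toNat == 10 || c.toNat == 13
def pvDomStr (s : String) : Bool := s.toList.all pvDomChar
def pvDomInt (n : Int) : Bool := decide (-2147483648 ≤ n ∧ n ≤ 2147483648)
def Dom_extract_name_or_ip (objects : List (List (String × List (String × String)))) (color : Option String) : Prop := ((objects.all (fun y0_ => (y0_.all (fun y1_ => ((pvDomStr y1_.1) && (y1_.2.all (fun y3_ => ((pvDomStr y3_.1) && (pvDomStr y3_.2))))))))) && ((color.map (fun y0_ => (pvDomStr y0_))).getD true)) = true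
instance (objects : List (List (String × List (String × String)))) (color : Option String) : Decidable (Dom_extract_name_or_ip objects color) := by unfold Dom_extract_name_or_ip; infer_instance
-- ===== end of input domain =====

-- B replaces A's per-object probe of a fixed five-key priority chain by a single
-- scan of each object's entries keeping the minimal-rank entry (alternative algorithm, same cost).

-- ===== PORT A =====
-- `key in obj` + `obj[key]` on an association list: first match (exact for Python dicts)
def pvLookup (obj : List (String × List (String × String))) (key : String) : Option (List (String × String)) :=
  match obj with
  | [] => none
  | (k', v) :: rest => if k' == key then some v else pvLookup rest key

-- d.get(sub, "") : first match or ""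
def pvGet (d : List (String × String)) (k : String) : String :=
  match d with
  | [] => ""
  | (k', v) :: rest => if k' == k then v else pvGet rest k

-- `if color:` — truthy iff not None and not ""
def pvTruthy (color : Option String) : Bool :=
  match color with
  | none => false
  | some c => !(c == "")

-- the f-string '<span style="color: {c}">{val}</span>'
def pvSpan (c val : String) : String :=
  "<span style=\"color: " ++ c ++ "\">" ++ val ++ "</span>"

-- body of A's first (colored) loop, one object
def pvARowColor (obj : List (String × List (String × String))) : String :=
  match pvLookup obj "networkIpAddress" with
  | some d => pvSpan "#507EA4" (pvGet d "inet")
  | none =>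
  match pvLookup obj "networkGroup" with
  | some d => pvSpan "#EB7852" (pvGet d "name")
  | none =>
  match pvLookup obj "networkGeoAddress" with
  | some d => pvSpan "#7FB99D" (pvGet d "name")
  | none =>
  match pvLookup obj "networkFqdn" with
  | some d => pvSpan "#DF8743" (pvGet d "fqdn")
  | none =>
  match pvLookup obj "networkIpRange" with
  | some d => pvSpan "#ED7AA1" (pvGet d "name")
  | none => "Error"

-- body of A's second (plain) loop, one object
def pvARowPlain (obj : List (String × List (String × String))) : String :=
  match pvLookup obj "networkIpAddress" with
  | some d => pvGet d "inet"
  | none =>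
  match pvLookup obj "networkGroup" with
  | some d => pvGet d "name"
  | none =>
  match pvLookup obj "networkGeoAddress" with
  | some d => pvGet d "name"
  | none =>
  match pvLookup obj "networkFqdn" with
  | some d => pvGet d "fqdn"
  | none =>
  match pvLookup obj "ipV4Range" with
  | some d => pvGet d "name"
  | none => "Error"

def extract_name_or_ip (objects : List (List (String × List (String × String)))) (color : Option String) : String :=
  let ip_list : List String :=
    if pvTruthy color then
      objects.foldl (fun acc obj => acc ++ [pvARowColor obj]) []
    else
      objects.foldl (fun acc obj => acc ++ [pvARowPlain obj]) []
  PySem.Str.join "<br> " ip_list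

-- ===== PORT B =====
def pvSubs : List String := ["inet", "name", "name", "fqdn", "name"]
def pvColors : List String := ["#507EA4", "#EB7852", "#7FB99D", "#DF8743", "#ED7AA1"]

-- ranks dict of Source B, parameterized by the mode-dependent fifth key
def pvRanks (key5 : String) : List (String × Int) :=
  [("networkIpAddress", 0), ("networkGroup", 1), ("networkGeoAddress", 2),
   ("networkFqdn", 3), (key5, 4)]

-- ranks.get(k): first match (String == is symmetric, so query-first comparison is exact)
def pvRankGet (ranks : List (String × Int)) (k : String) : Option Int :=
  match ranks with
  | [] => none
  | (k', r) :: rest => if k == k' then some r else pvRankGet rest k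

-- one step of Source B's inner loop: keep the strictly smaller rank (first wins on ties)
def pvStep (ranks : List (String × Int))
    (best : Option (Int × List (String × String))) (e : String × List (String × String)) :
    Option (Int × List (String × String)) :=
  match pvRankGet ranks e.1 with
  | none => best
  | some r =>
    match best with
    | none => some (r, e.2)
    | some (br, bv) => if r < br then some (r, e.2) else some (br, bv)

-- Source B's inner loop over obj.items()
def pvBest (ranks : List (String × Int)) (obj : List (String × List (String × String))) :
    Option (Int × List (String × String)) :=
  obj.foldl (pvStep ranks) none

-- format the winning entry (rank 0..4, so the list indexings are in range; getD "" is a totality guard)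
def pvRowB (ranks : List (String × Int)) (colored : Bool)
    (obj : List (String × List (String × String))) : String :=
  match pvBest ranks obj with
  | none => "Error"
  | some (r, v) =>
    let val := pvGet v ((PySem.List.pyGet? pvSubs r).getD "")
    if colored then pvSpan ((PySem.List.pyGet? pvColors r).getD "") val else val

def extract_name_or_ip_alt (objects : List (List (String × List (String × String)))) (color : Option String) : String :=
  let colored := pvTruthy color
  let ranks := pvRanks (if colored then "networkIpRange" else "ipV4Range")
  PySem.Str.join "<br> " (objects.map (pvRowB ranks colored))

-- ===== PRECONDITION & SPEC =====
def Spec_extract_name_or_ip (objects : List (List (String × List (String × String)))) (color : Option String) (out : String) : Prop := out = extract_name_or_ip_alt objects color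
instance (objects : List (List (String × List (String × String)))) (color : Option String) (out : String) : Decidable (Spec_extract_name_or_ip objects color out) := by unfold Spec_extract_name_or_ip; infer_instance

-- ===== CLAIM (what is proved, stated in full; the proofs are below) =====
def Claim_equal_extract_name_or_ip : Prop := ∀ (objects : List (List (String × List (String × String)))) (color : Option String), Dom_extract_name_or_ip objects color → Spec_extract_name_or_ip objects color (extract_name_or_ip objects color)

-- ===== LEMMAS AND PROOFS =====

-- "first present key of the priority chain", the common characterisation
def pvChain (key5 : String) (obj : List (String × List (String × String))) :
    Option (Int × List (String × String)) :=
  match pvLookup obj "networkIpAddress" with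
  | some d => some (0, d)
  | none =>
  match pvLookup obj "networkGroup" with
  | some d => some (1, d)
  | none =>
  match pvLookup obj "networkGeoAddress" with
  | some d => some (2, d)
  | none =>
  match pvLookup obj "networkFqdn" with
  | some d => some (3, d)
  | none =>
  match pvLookup obj key5 with
  | some d => some (4, d)
  | none => none

def pvMerge (a b : Option (Int × List (String × String))) : Option (Int × List (String × String)) :=
  match b with
  | none => a
  | some (r2, v2) =>
    match a with
    | none => some (r2, v2)
    | some (r1, v1) => if r2 < r1 then some (r2, v2) else some (r1, v1)

theorem pvStep_eq_merge (ranks : List (String × Int))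
    (best : Option (Int × List (String × String))) (e : String × List (String × String)) :
    pvStep ranks best e = pvMerge best (pvStep ranks none e) := by
  unfold pvStep pvMerge
  cases pvRankGet ranks e.1 <;> cases best <;> rfl

theorem pvMerge_none_left (b : Option (Int × List (String × String))) :
    pvMerge none b = b := by
  rcases b with _ | ⟨r, v⟩ <;> rfl

theorem pvMerge_assoc (a b c : Option (Int × List (String × String))) :
    pvMerge (pvMerge a b) c = pvMerge a (pvMerge b c) := by
  rcases a with _ | ⟨r1, v1⟩
  · rw [pvMerge_none_left, pvMerge_none_left]
  rcases b with _ | ⟨r2, v2⟩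
  · rw [pvMerge_none_left]; rfl
  rcases c with _ | ⟨r3, v3⟩
  · rfl
  by_cases h12 : r2 < r1 <;> by_cases h23 : r3 < r2 <;> by_cases h13 : r3 < r1 <;>
    simp [pvMerge, h12, h23, h13] <;> first | rfl | omega

theorem pvBest_foldl (ranks : List (String × Int)) (obj : List (String × List (String × String)))
    (acc : Option (Int × List (String × String))) :
    obj.foldl (pvStep ranks) acc = pvMerge acc (pvBest ranks obj) := by
  induction obj generalizing acc with
  | nil => cases acc <;> rfl
  | cons e t ih =>
    show List.foldl (pvStep ranks) (pvStep ranks acc e) t = _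
    rw [ih, pvStep_eq_merge, pvMerge_assoc]
    have : pvBest ranks (e :: t) = pvMerge (pvStep ranks none e) (pvBest ranks t) := by
      show List.foldl (pvStep ranks) (pvStep ranks none e) t = _
      rw [ih]
    rw [this]

theorem pvBest_cons (ranks : List (String × Int)) (e : String × List (String × String))
    (t : List (String × List (String × String))) :
    pvBest ranks (e :: t) = pvMerge (pvStep ranks none e) (pvBest ranks t) := by
  show List.foldl (pvStep ranks) (pvStep ranks none e) t = _
  rw [pvBest_foldl]

theorem pvBest_eq_chain (key5 : String) (obj : List (String × List (String × String))) :
    pvBest (pvRanks key5) obj = pvChain key5 obj := by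
  induction obj with
  | nil => rfl
  | cons e t ih =>
    obtain ⟨k, v⟩ := e
    rw [pvBest_cons, ih]
    by_cases h0 : k = "networkIpAddress" <;>
    by_cases h1 : k = "networkGroup" <;>
    by_cases h2 : k = "networkGeoAddress" <;>
    by_cases h3 : k = "networkFqdn" <;>
    by_cases h4 : k = key5 <;>
      simp_all [pvChain, pvLookup, pvStep, pvRankGet, pvRanks] <;>
      cases pvLookup t "networkIpAddress" <;>
      cases pvLookup t "networkGroup" <;>
      cases pvLookup t "networkGeoAddress" <;>
      cases pvLookup t "networkFqdn" <;>
      cases pvLookup t key5 <;>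
        simp [pvMerge]

theorem pvRowB_color (obj : List (String × List (String × String))) :
    pvRowB (pvRanks "networkIpRange") true obj = pvARowColor obj := by
  unfold pvRowB pvARowColor
  rw [pvBest_eq_chain]
  unfold pvChain
  cases pvLookup obj "networkIpAddress" <;>
  cases pvLookup obj "networkGroup" <;>
  cases pvLookup obj "networkGeoAddress" <;>
  cases pvLookup obj "networkFqdn" <;>
  cases pvLookup obj "networkIpRange" <;> rfl

theorem pvRowB_plain (obj : List (String × List (String × String))) :
    pvRowB (pvRanks "ipV4Range") false obj = pvARowPlain obj := by
  unfold pvRowB pvARowPlain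
  rw [pvBest_eq_chain]
  unfold pvChain
  cases pvLookup obj "networkIpAddress" <;>
  cases pvLookup obj "networkGroup" <;>
  cases pvLookup obj "networkGeoAddress" <;>
  cases pvLookup obj "networkFqdn" <;>
  cases pvLookup obj "ipV4Range" <;> rfl

theorem pvFoldl_push {α β : Type} (f : α → β) (xs : List α) (acc : List β) :
    xs.foldl (fun a o => a ++ [f o]) acc = acc ++ xs.map f := by
  induction xs generalizing acc with
  | nil => simp
  | cons x xs ih => simp [List.foldl_cons, ih]

-- ===== VERDICT (by name: the statement is the Claim_ definition above) =====
theorem extract_name_or_ip_spec : Claim_equal_extract_name_or_ip := by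
  intro objects color _
  unfold Spec_extract_name_or_ip extract_name_or_ip extract_name_or_ip_alt
  cases h : pvTruthy color <;>
    simp only [if_true, if_false, Bool.false_eq_true, pvFoldl_push, List.nil_append,
      funext pvRowB_color, funext pvRowB_plain]
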